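-- pv_equiv track=rewrite | github.com/guptaharsh13/cybersec | des/utils.py | formatHex
-- ===== SOURCE A (Python) =====
-- def formatHex(hex):
--
--     groups = []
--     count = 0
--     group = ""
--     for ch in hex:
--         count += 1
--         group += ch
--         if count == 2:
--             count = 0
--             groups.append(group)
--             group = ""
--     if group:
--         groups.append(group)
--
--     return " ".join(groups)
-- ===== SOURCE B (Python) =====
-- def formatHex(hex):
--     return " ".join(hex[i:i + 2] for i in range(0, len(hex), 2))
-- ===== Notes on version B (the rewrite author's own statement) =====
-- stated objective: idiomatic
-- what changed: Replaces A's character-by-character loop maintaining a counter, a running group string and a groups list by a single join over two-character slices taken at even index positions (range step 2); no per-character state is kept.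
import Mathlib
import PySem

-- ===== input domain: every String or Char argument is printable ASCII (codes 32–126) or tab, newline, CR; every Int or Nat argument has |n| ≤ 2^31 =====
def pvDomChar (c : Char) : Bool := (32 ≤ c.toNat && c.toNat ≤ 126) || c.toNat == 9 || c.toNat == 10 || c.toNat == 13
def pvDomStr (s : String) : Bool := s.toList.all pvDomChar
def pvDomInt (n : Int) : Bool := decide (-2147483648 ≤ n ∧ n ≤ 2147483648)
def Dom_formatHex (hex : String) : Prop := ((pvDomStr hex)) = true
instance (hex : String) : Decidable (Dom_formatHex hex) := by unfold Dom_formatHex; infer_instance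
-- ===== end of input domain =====

-- B replaces A's per-character loop with counter/accumulator state by a single join over
-- two-character slices taken at even index positions (objective: idiomatic).


-- ===== PORT A =====
-- strings are handled as List Char; one step of A's for-loop over (groups, count, group)
def fhStep (s : List (List Char) × Int × List Char) (ch : Char) :
    List (List Char) × Int × List Char :=
  let count := s.2.1 + 1
  let group := s.2.2 ++ [ch]
  if count == 2 then (s.1 ++ [group], 0, []) else (s.1, count, group)

-- " ".join(groups), first-match recursion
def fhJoinSp : List (List Char) → List Char
  | [] => []
  | [g] => g
  | g :: t => g ++ ' ' :: fhJoinSp t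

def formatHex (hex : String) : String :=
  match hex.toList.foldl fhStep ([], 0, []) with
  | (groups, _, group) =>
      String.ofList (fhJoinSp (if group ≠ [] then groups ++ [group] else groups))

-- ===== PORT B =====
-- Source B: " ".join(hex[i:i+2] for i in range(0, len(hex), 2)); " ".join ported as
-- List.intercalate [' '], the slice and range via PySem (exact)
def formatHex_alt (hex : String) : String :=
  String.ofList (List.intercalate [' ']
    ((PySem.List.pyRange 0 (hex.toList.length : Int) 2).map
      (fun i => PySem.List.slice hex.toList (some i) (some (i + 2)))))

-- ===== PRECONDITION & SPEC =====
def Spec_formatHex (hex : String) (out : String) : Prop := out = formatHex_alt hex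
instance (hex : String) (out : String) : Decidable (Spec_formatHex hex out) := by unfold Spec_formatHex; infer_instance

-- ===== CLAIM (what is proved, stated in full; the proofs are below) =====
def Claim_equal_formatHex : Prop := ∀ (hex : String), Dom_formatHex hex → Spec_formatHex hex (formatHex hex)

-- ===== LEMMAS AND PROOFS =====
-- common characterisation: the list of 2-char groups (last may have 1 char)
def fhChunks : List Char → List (List Char)
  | [] => []
  | [a] => [[a]]
  | a :: b :: t => [a, b] :: fhChunks t

def fhFinal (s : List (List Char) × Int × List Char) : List (List Char) :=
  if s.2.2 ≠ [] then s.1 ++ [s.2.2] else s.1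

theorem foldl_chunks (l : List Char) :
    ∀ gs, fhFinal (l.foldl fhStep (gs, 0, [])) = gs ++ fhChunks l := by
  induction l using fhChunks.induct with
  | case1 => intro gs; simp [fhFinal, fhChunks]
  | case2 a => intro gs; simp [fhStep, fhFinal, fhChunks]
  | case3 a b t ih =>
      intro gs
      have h1 : fhStep (gs, 0, []) a = (gs, 1, [a]) := by simp [fhStep]
      have h2 : fhStep (gs, 1, [a]) b = (gs ++ [[a, b]], 0, []) := by simp [fhStep]
      simp only [List.foldl, h1, h2, ih, fhChunks, List.append_assoc, List.cons_append,
        List.nil_append]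

theorem intercalate_joinSp (gs : List (List Char)) :
    List.intercalate [' '] gs = fhJoinSp gs := by
  induction gs with
  | nil => simp [fhJoinSp, List.intercalate]
  | cons g t ih =>
      cases t with
      | nil => simp [fhJoinSp, List.intercalate]
      | cons h u =>
          have step : List.intercalate [' '] (g :: h :: u) =
              g ++ ' ' :: List.intercalate [' '] (h :: u) := by
            simp [List.intercalate, List.intersperse]
          rw [step, ih]
          rfl

theorem range_chunks (l : List Char) :
    (List.range ((l.length + 1) / 2)).map (fun k => (l.drop (2 * k)).take 2) = fhChunks l := by
  induction l using fhChunks.induct with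
  | case1 => simp [fhChunks]
  | case2 a => simp [fhChunks, List.range_succ]
  | case3 a b t ih =>
      have hm : ((a :: b :: t).length + 1) / 2 = (t.length + 1) / 2 + 1 := by
        simp; omega
      rw [hm, List.range_succ_eq_map, List.map_cons, List.map_map]
      have hmap : ((List.range ((t.length + 1) / 2)).map
          ((fun k => ((a :: b :: t).drop (2 * k)).take 2) ∘ Nat.succ)) =
          (List.range ((t.length + 1) / 2)).map (fun k => (t.drop (2 * k)).take 2) := by
        apply List.map_congr_left
        intro k _
        simp [Function.comp, List.drop]
      rw [hmap, ih]
      simp [fhChunks]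

theorem map_slices (l : List Char) :
    (PySem.List.pyRange 0 (l.length : Int) 2).map
      (fun i => PySem.List.slice l (some i) (some (i + 2))) = fhChunks l := by
  rw [PySem.List.pyRange_of_pos 0 (l.length : Int) (by norm_num), List.map_map]
  have hM : (if (0 : Int) < (l.length : Int) then
      (((l.length : Int) - 0 + 2 - 1) / 2).toNat else 0) = (l.length + 1) / 2 := by
    split_ifs with h
    · omega
    · omega
  rw [hM, ← range_chunks l]
  apply List.map_congr_left
  intro k _
  show PySem.List.slice l (some (0 + 2 * (k : Int))) (some (0 + 2 * (k : Int) + 2)) = _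
  rw [PySem.List.slice_toNat l (by positivity) (by positivity)]
  have e1 : ((0 : Int) + 2 * (k : Int)).toNat = 2 * k := by omega
  have e2 : ((0 : Int) + 2 * (k : Int) + 2).toNat = 2 * k + 2 := by omega
  rw [e1, e2]
  have e3 : 2 * k + 2 - 2 * k = 2 := by omega
  rw [e3]

-- ===== VERDICT (by name: the statement is the Claim_ definition above) =====
theorem formatHex_spec : Claim_equal_formatHex := by
  intro hex _
  show formatHex hex = formatHex_alt hex
  unfold formatHex formatHex_alt
  rw [map_slices, intercalate_joinSp]
  have h := foldl_chunks hex.toList []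
  rw [List.nil_append] at h
  rw [← h]
  rfl
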